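-- pv_equiv track=rewrite | github.com/chicoferreira/PL2024 | TPC2/tpc2.py | insert_ol_tag
-- ===== SOURCE A (Python) =====
-- def insert_ol_tag(lines: list[str]):
--     previous_has_il = False
--     for i, line in enumerate(lines):
--         is_li = line.startswith("<li>")
--         if is_li and not previous_has_il:
--             lines.insert(i, "<ol>\n")
--         elif not is_li and previous_has_il:
--             lines.insert(i, "</ol>\n")
--         previous_has_il = is_li
--
--     return lines
-- ===== SOURCE B (Python) =====
-- def insert_ol_tag(lines: list[str]):
--     out = []
--     previous_has_il = False
--     for line in lines:
--         is_li = line.startswith("<li>")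
--         if is_li and not previous_has_il:
--             out.append("<ol>\n")
--         elif not is_li and previous_has_il:
--             out.append("</ol>\n")
--         out.append(line)
--         previous_has_il = is_li
--     if previous_has_il:
--         out.append("</ol>\n")
--     lines[:] = out
--     return lines
-- ===== Notes on version B (the rewrite author's own statement) =====
-- stated objective: alternative
-- what changed: Replaces A's mutate-while-iterating loop (list.insert inside enumerate, re-scanning shifted positions) by a single forward pass that builds a fresh output list on block transitions, and closes a list block that is still open when the input ends.
-- intended difference: On inputs whose last line starts with '<li>' A returns the output with the final <ol> block left unclosed (no trailing '</ol>\n'), while B appends the closing '</ol>\n'; B's is the intended value because an unclosed <ol> is invalid HTML. — e.g. on insert_ol_tag(["<li>a\n"]): A returns ["<ol>\n", "<li>a\n"], B returns ["<ol>\n", "<li>a\n", "</ol>\n"]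
import Mathlib
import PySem

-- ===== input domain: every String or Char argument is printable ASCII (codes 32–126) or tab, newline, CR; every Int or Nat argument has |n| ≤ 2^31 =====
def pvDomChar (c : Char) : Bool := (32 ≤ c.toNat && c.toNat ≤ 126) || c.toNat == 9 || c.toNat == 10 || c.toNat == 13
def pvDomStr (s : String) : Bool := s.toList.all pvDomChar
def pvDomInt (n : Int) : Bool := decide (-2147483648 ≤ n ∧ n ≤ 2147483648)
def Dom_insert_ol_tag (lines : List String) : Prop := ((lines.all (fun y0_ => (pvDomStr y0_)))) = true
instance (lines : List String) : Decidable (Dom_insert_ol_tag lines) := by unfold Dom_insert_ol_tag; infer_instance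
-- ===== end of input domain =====

-- B replaces A's mutate-while-iterating loop (list.insert inside enumerate) by a single
-- forward pass building a new list, and also closes a trailing open <li> block
-- (intended difference D_ below). A mutates its argument in place; B mutates it the same
-- way (lines[:] = out), and the theorems below are about the RETURN value.


-- ===== PORT A =====
-- Python's `for i, line in enumerate(lines)` over a list mutated by `lines.insert(i, …)`
-- reads lines[i] while i < len(lines); the fuel (2*len+1) only makes that loop total — it
-- never runs out, since each of the ≤ len(lines) inserts lengthens the list by one.
def pvALoop : Nat → List String → Nat → Bool → List String
  | 0, lines, _, _ => lines
  | fuel+1, lines, i, prev =>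
    match PySem.List.pyGet? lines (i : Int) with
    | none => lines
    | some line =>
      let is_li := PySem.Str.startswith line "<li>"
      if is_li && !prev then
        pvALoop fuel (PySem.List.insert lines (i : Int) "<ol>\n") (i+1) is_li
      else if !is_li && prev then
        pvALoop fuel (PySem.List.insert lines (i : Int) "</ol>\n") (i+1) is_li
      else
        pvALoop fuel lines (i+1) is_li

def insert_ol_tag (lines : List String) : List String :=
  pvALoop (2 * lines.length + 1) lines 0 false

-- ===== PORT B =====
def insert_ol_tag_alt (lines : List String) : List String :=
  let s := lines.foldl (fun (s : List String × Bool) line =>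
      let is_li := PySem.Str.startswith line "<li>"
      let out := if is_li && !s.2 then s.1 ++ ["<ol>\n"]
                 else if !is_li && s.2 then s.1 ++ ["</ol>\n"]
                 else s.1
      (out ++ [line], is_li)) ([], false)
  if s.2 then s.1 ++ ["</ol>\n"] else s.1

-- ===== PRECONDITION & SPEC =====
-- On inputs whose last line starts with "<li>", A leaves the final <ol> block unclosed
-- (no trailing "</ol>\n"); B appends the closing "</ol>\n", which is the intended value
-- since an unclosed <ol> is invalid HTML.
def D_insert_ol_tag (lines : List String) : Prop :=
  lines.getLast?.elim false (fun l => PySem.Str.startswith l "<li>") = true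
instance (lines : List String) : Decidable (D_insert_ol_tag lines) := by
  unfold D_insert_ol_tag; infer_instance

def Spec_insert_ol_tag (lines : List String) (out : List String) : Prop :=
  ¬ D_insert_ol_tag lines → out = insert_ol_tag_alt lines
instance (lines : List String) (out : List String) : Decidable (Spec_insert_ol_tag lines out) := by
  unfold Spec_insert_ol_tag; infer_instance

def pvDiffWitness_insert_ol_tag : List String := ["<li>a\n"]
def pvDiffWitnessOut_insert_ol_tag : (List String) × (List String) :=
  (["<ol>\n", "<li>a\n"], ["<ol>\n", "<li>a\n", "</ol>\n"])

-- ===== CLAIM (what is proved, stated in full; the proofs are below) =====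
def Claim_unchanged_insert_ol_tag : Prop :=
  ∀ (lines : List String), Dom_insert_ol_tag lines → Spec_insert_ol_tag lines (insert_ol_tag lines)
def Claim_changed_insert_ol_tag : Prop :=
  Dom_insert_ol_tag (pvDiffWitness_insert_ol_tag) ∧ D_insert_ol_tag (pvDiffWitness_insert_ol_tag) ∧
  insert_ol_tag (pvDiffWitness_insert_ol_tag) = pvDiffWitnessOut_insert_ol_tag.1 ∧
  insert_ol_tag_alt (pvDiffWitness_insert_ol_tag) = pvDiffWitnessOut_insert_ol_tag.2 ∧
  pvDiffWitnessOut_insert_ol_tag.1 ≠ pvDiffWitnessOut_insert_ol_tag.2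
def Claim_exact_insert_ol_tag : Prop :=
  ∀ (lines : List String), Dom_insert_ol_tag lines → D_insert_ol_tag lines →
    insert_ol_tag lines ≠ insert_ol_tag_alt lines

-- ===== LEMMAS AND PROOFS =====

-- The common one-pass body: what both programs emit for the remaining lines, given whether
-- the previous line was an <li> line.
def pvBody (prev : Bool) : List String → List String
  | [] => []
  | l :: rest =>
    if PySem.Str.startswith l "<li>" && !prev then "<ol>\n" :: l :: pvBody true rest
    else if !(PySem.Str.startswith l "<li>") && prev then "</ol>\n" :: l :: pvBody false rest
    else l :: pvBody (PySem.Str.startswith l "<li>") rest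

-- The flag after processing the remaining lines.
def pvLast (prev : Bool) : List String → Bool
  | [] => prev
  | l :: rest => pvLast (PySem.Str.startswith l "<li>") rest

theorem pvALoop_eq (rest : List String) : ∀ (acc : List String) (prev : Bool) (fuel : Nat),
    2 * rest.length + 1 ≤ fuel →
    pvALoop fuel (acc ++ rest) acc.length prev = acc ++ pvBody prev rest := by
  induction rest with
  | nil =>
    intro acc prev fuel hf
    obtain ⟨f, rfl⟩ : ∃ f, fuel = f + 1 := ⟨fuel - 1, by omega⟩
    simp [pvALoop, pvBody, PySem.List.pyGet?_natCast]
  | cons l rest ih =>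
    intro acc prev fuel hf
    obtain ⟨f, rfl⟩ : ∃ f, fuel = f + 1 + 1 := ⟨fuel - 2, by simp at hf; omega⟩
    have hget : PySem.List.pyGet? (acc ++ l :: rest) ((acc.length : Nat) : Int) = some l :=
      PySem.List.pyGet?_append_length acc rest l
    cases hli : PySem.Str.startswith l "<li>" <;>
      have hli' : PySem.Chars.startswith l.toList ['<', 'l', 'i', '>'] = PySem.Str.startswith l "<li>" := by simp
    all_goals rw [hli] at hli'
    all_goals cases hp : prev <;> subst hp
    · -- not li, prev false: plain step
      rw [pvALoop, hget]
      simp only [hli, Bool.not_false, Bool.not_true, Bool.false_and, Bool.true_and,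
        Bool.and_false, Bool.and_true, Bool.false_eq_true, Bool.true_eq_false, eq_self_iff_true, if_true, if_false, ite_true, ite_false, reduceIte]
      have := ih (acc ++ [l]) false (f + 1) (by simp at hf ⊢; omega)
      simp only [List.append_assoc, List.singleton_append, List.length_append,
        List.length_cons, List.length_nil] at this
      simpa [pvBody, hli', Nat.add_assoc] using this
    · -- not li, prev true: insert "</ol>\n"
      rw [pvALoop, hget]
      simp only [hli, Bool.not_false, Bool.not_true, Bool.false_and, Bool.true_and,
        Bool.and_false, Bool.and_true, Bool.false_eq_true, Bool.true_eq_false, eq_self_iff_true, if_true, if_false, ite_true, ite_false, reduceIte]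
      rw [PySem.List.insert_natCast _ _ _ (by simp)]
      simp only [List.take_left, List.drop_left]
      have hget2 : PySem.List.pyGet? ((acc ++ ["</ol>\n"]) ++ l :: rest)
          (((acc ++ ["</ol>\n"]).length : Nat) : Int) = some l :=
        PySem.List.pyGet?_append_length _ rest l
      simp only [List.append_assoc, List.singleton_append, List.length_append,
        List.length_cons, List.length_nil, Nat.zero_add] at hget2
      cases f with
      | zero => simp only [List.length_cons] at hf; omega
      | succ f' =>
        rw [pvALoop, hget2]
        simp only [hli, Bool.not_false, Bool.not_true, Bool.false_and, Bool.true_and,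
          Bool.and_false, Bool.and_true, Bool.false_eq_true, Bool.true_eq_false, eq_self_iff_true, if_true, if_false, ite_true, ite_false, reduceIte]
        have := ih (acc ++ ["</ol>\n", l]) false (f' + 1) (by simp at hf ⊢; omega)
        simp only [List.append_assoc, List.cons_append, List.nil_append, List.length_append,
          List.length_cons, List.length_nil] at this
        simpa [pvBody, hli', Nat.add_assoc] using this
    · -- li, prev false: insert "<ol>\n"
      rw [pvALoop, hget]
      simp only [hli, Bool.not_false, Bool.not_true, Bool.false_and, Bool.true_and,
        Bool.and_false, Bool.and_true, Bool.false_eq_true, Bool.true_eq_false, eq_self_iff_true, if_true, if_false, ite_true, ite_false, reduceIte]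
      rw [PySem.List.insert_natCast _ _ _ (by simp)]
      simp only [List.take_left, List.drop_left]
      have hget2 : PySem.List.pyGet? ((acc ++ ["<ol>\n"]) ++ l :: rest)
          (((acc ++ ["<ol>\n"]).length : Nat) : Int) = some l :=
        PySem.List.pyGet?_append_length _ rest l
      simp only [List.append_assoc, List.singleton_append, List.length_append,
        List.length_cons, List.length_nil, Nat.zero_add] at hget2
      cases f with
      | zero => simp only [List.length_cons] at hf; omega
      | succ f' =>
        rw [pvALoop, hget2]
        simp only [hli, Bool.not_false, Bool.not_true, Bool.false_and, Bool.true_and,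
          Bool.and_false, Bool.and_true, Bool.false_eq_true, Bool.true_eq_false, eq_self_iff_true, if_true, if_false, ite_true, ite_false, reduceIte]
        have := ih (acc ++ ["<ol>\n", l]) true (f' + 1) (by simp at hf ⊢; omega)
        simp only [List.append_assoc, List.cons_append, List.nil_append, List.length_append,
          List.length_cons, List.length_nil] at this
        simpa [pvBody, hli', Nat.add_assoc] using this
    · -- li, prev true: plain step
      rw [pvALoop, hget]
      simp only [hli, Bool.not_false, Bool.not_true, Bool.false_and, Bool.true_and,
        Bool.and_false, Bool.and_true, Bool.false_eq_true, Bool.true_eq_false, eq_self_iff_true, if_true, if_false, ite_true, ite_false, reduceIte]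
      have := ih (acc ++ [l]) true (f + 1) (by simp at hf ⊢; omega)
      simp only [List.append_assoc, List.singleton_append, List.length_append,
        List.length_cons, List.length_nil] at this
      simpa [pvBody, hli', Nat.add_assoc] using this

theorem insert_ol_tag_eq_body (lines : List String) :
    insert_ol_tag lines = pvBody false lines := by
  have := pvALoop_eq lines [] false (2 * lines.length + 1) (le_refl _)
  simpa [insert_ol_tag] using this

theorem foldl_eq_body (rest : List String) : ∀ (out : List String) (prev : Bool),
    rest.foldl (fun (s : List String × Bool) line =>
      let is_li := PySem.Str.startswith line "<li>"
      let out := if is_li && !s.2 then s.1 ++ ["<ol>\n"]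
                 else if !is_li && s.2 then s.1 ++ ["</ol>\n"]
                 else s.1
      (out ++ [line], is_li)) (out, prev)
    = (out ++ pvBody prev rest, pvLast prev rest) := by
  induction rest with
  | nil => intro out prev; simp [pvBody, pvLast]
  | cons l rest ih =>
    intro out prev
    cases hli : PySem.Str.startswith l "<li>" <;>
      have hli' : PySem.Chars.startswith l.toList ['<', 'l', 'i', '>'] = PySem.Str.startswith l "<li>" := by simp
    all_goals rw [hli] at hli'
    all_goals cases hp : prev <;> subst hp <;>
      simp only [List.foldl_cons, hli, Bool.not_false, Bool.not_true, Bool.false_and,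
        Bool.true_and, Bool.and_false, Bool.and_true, Bool.false_eq_true, Bool.true_eq_false,
        if_true, if_false, ite_true] <;>
      rw [ih] <;> simp [pvBody, pvLast, hli']

theorem insert_ol_tag_alt_eq (lines : List String) :
    insert_ol_tag_alt lines =
      pvBody false lines ++ (if pvLast false lines then ["</ol>\n"] else []) := by
  unfold insert_ol_tag_alt
  rw [foldl_eq_body]
  split <;> rename_i h <;> simp [h]

theorem pvLast_append (rest : List String) : ∀ (prev : Bool) (l : String),
    pvLast prev (rest ++ [l]) = PySem.Str.startswith l "<li>" := by
  induction rest with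
  | nil => intro prev l; simp [pvLast]
  | cons x rest ih => intro prev l; simp [pvLast, ih]

theorem pvLast_eq_D (lines : List String) :
    pvLast false lines = true ↔ D_insert_ol_tag lines := by
  rcases List.eq_nil_or_concat lines with rfl | ⟨rest, x, rfl⟩
  · simp [pvLast, D_insert_ol_tag]
  · simp [pvLast_append, D_insert_ol_tag]

-- ===== VERDICT (by name: the statement is the Claim_ definition above) =====
theorem insert_ol_tag_spec : Claim_unchanged_insert_ol_tag := by
  intro lines _ hD'
  rw [insert_ol_tag_eq_body, insert_ol_tag_alt_eq]
  have : pvLast false lines = false := by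
    cases h : pvLast false lines
    · rfl
    · exact absurd ((pvLast_eq_D lines).mp h) hD'
  simp [this]

theorem insert_ol_tag_changed : Claim_changed_insert_ol_tag := by
  unfold Claim_changed_insert_ol_tag; decide

theorem insert_ol_tag_tight : Claim_exact_insert_ol_tag := by
  intro lines _ hD
  rw [insert_ol_tag_eq_body, insert_ol_tag_alt_eq]
  have : pvLast false lines = true := (pvLast_eq_D lines).mpr hD
  rw [this]
  intro h
  have := congrArg List.length h
  simp at this
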